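-- pv_equiv track=rewrite | github.com/Matlar/AdventofCode2016 | Day07_InternetProtocolVersion7/findIP2.py | findABA
-- ===== SOURCE A (Python) =====
-- def findABA(message):
-- 	abas = []
-- 	for i in range(len(message) - 2):
-- 		a = message[i]
-- 		b = message[i + 1]
-- 		c = message[i + 2]
-- 		if a == c and a != b:
-- 			abas.append(a+b+c)
-- 	return abas
-- ===== SOURCE B (Python) =====
-- import re
--
-- _ABA = re.compile(r'(?=(.)((?!\1).)\1)', re.DOTALL)
--
-- def findABA(message):
--     return [m.group(1) + m.group(2) + m.group(1) for m in _ABA.finditer(message)]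
-- ===== Notes on version B (the rewrite author's own statement) =====
-- stated objective: idiomatic
-- what changed: Replaced the hand-written index loop with the regex engine: a compiled zero-width lookahead pattern (?=(.)((?!\1).)\1) with re.DOTALL yields each overlapping ABA start position, and the triple is rebuilt from the capture groups.
import Mathlib
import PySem

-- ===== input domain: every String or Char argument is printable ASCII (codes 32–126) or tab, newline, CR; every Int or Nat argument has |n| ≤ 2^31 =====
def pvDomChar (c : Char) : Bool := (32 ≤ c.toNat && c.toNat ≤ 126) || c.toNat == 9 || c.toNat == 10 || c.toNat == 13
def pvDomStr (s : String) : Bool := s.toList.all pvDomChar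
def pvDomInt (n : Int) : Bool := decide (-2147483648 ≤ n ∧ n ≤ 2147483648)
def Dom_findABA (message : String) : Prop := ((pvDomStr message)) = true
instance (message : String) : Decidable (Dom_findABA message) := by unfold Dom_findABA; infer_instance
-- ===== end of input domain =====

-- B hands the scan to the regex engine: re.finditer of the zero-width lookahead
-- (?=(.)((?!\1).)\1) with DOTALL, rebuilding each triple from the capture groups
-- (objective: idiomatic; same O(n) cost).

-- ===== PORT A =====
-- literal port of A: for i in range(len(message)-2): a,b,c = message[i..i+2]; if a==c and a!=b: abas.append(a+b+c)
def findABA (message : String) : List String :=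
  (PySem.List.pyRange 0 (PySem.Str.len message - 2) 1).foldl (fun abas i =>
    match PySem.Str.pyGet? message i, PySem.Str.pyGet? message (i + 1), PySem.Str.pyGet? message (i + 2) with
    | some a, some b, some c =>
        if a = c ∧ a ≠ b then abas ++ [String.ofList [a, b, c]] else abas
    | _, _, _ => abas) []  -- indices i, i+1, i+2 are always in range, so the wildcard arm is unreachable

-- ===== PORT B =====
-- Hand-port of re.finditer with the compiled pattern r'(?=(.)((?!\1).)\1)' under
-- re.DOTALL (PySem has no regex engine): finditer tries the lookahead at each
-- position left to right, and because every match is zero-width it advances by one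
-- character after each attempt. The lookahead succeeds at a position exactly when
-- three characters a, b, c remain there with the negative lookahead (?!\1) making
-- b ≠ a and the back-reference \1 forcing c = a ('.' matches newline under DOTALL,
-- i.e. any character, which is exact here); the emitted string is group1+group2+group1
-- = a + b + a = [a, b, c]. Fewer than three remaining characters fail the attempt.
def pvReScan : List Char → List String
  | a :: b :: c :: rest =>
      if c = a ∧ b ≠ a then String.ofList [a, b, c] :: pvReScan (b :: c :: rest)
      else pvReScan (b :: c :: rest)
  | _ => []

def findABA_alt (message : String) : List String := pvReScan message.toList

-- ===== PRECONDITION & SPEC =====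
def Spec_findABA (message : String) (out : List String) : Prop := out = findABA_alt message
instance (message : String) (out : List String) : Decidable (Spec_findABA message out) := by unfold Spec_findABA; infer_instance

-- ===== CLAIM (what is proved, stated in full; the proofs are below) =====
def Claim_equal_findABA : Prop := ∀ (message : String), Dom_findABA message → Spec_findABA message (findABA message)

-- ===== LEMMAS AND PROOFS =====

-- what one iteration of A's loop appends for index i
def pvStepOut (l : List Char) (i : Int) : List String :=
  match PySem.List.pyGet? l i, PySem.List.pyGet? l (i + 1), PySem.List.pyGet? l (i + 2) with
  | some a, some b, some c => if a = c ∧ a ≠ b then [String.ofList [a, b, c]] else []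
  | _, _, _ => []

lemma pvStepOut_cons (a : Char) (t : List Char) (k : Nat) :
    pvStepOut (a :: t) ((k : Int) + 1) = pvStepOut t k := by
  simp only [pvStepOut]
  rw [show ((k:Int)+1)+1 = ((k+1:Nat):Int)+1 by push_cast; ring,
      show ((k:Int)+1)+2 = ((k+2:Nat):Int)+1 by push_cast; ring,
      PySem.List.pyGet?_cons_succ, PySem.List.pyGet?_cons_succ, PySem.List.pyGet?_cons_succ]
  push_cast
  rfl

lemma pvFold_eq_flatMap (l : List Char) (xs : List Int) (acc : List String) :
    xs.foldl (fun abas i =>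
      match PySem.List.pyGet? l i, PySem.List.pyGet? l (i + 1), PySem.List.pyGet? l (i + 2) with
      | some a, some b, some c =>
          if a = c ∧ a ≠ b then abas ++ [String.ofList [a, b, c]] else abas
      | _, _, _ => abas) acc = acc ++ xs.flatMap (pvStepOut l) := by
  induction xs generalizing acc with
  | nil => simp
  | cons i xs ih =>
      simp only [List.foldl_cons, List.flatMap_cons, ih]
      have : (match PySem.List.pyGet? l i, PySem.List.pyGet? l (i + 1), PySem.List.pyGet? l (i + 2) with
        | some a, some b, some c =>
            if a = c ∧ a ≠ b then acc ++ [String.ofList [a, b, c]] else acc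
        | _, _, _ => acc) = acc ++ pvStepOut l i := by
        unfold pvStepOut
        rcases PySem.List.pyGet? l i with _ | a <;>
          rcases PySem.List.pyGet? l (i + 1) with _ | b <;>
            rcases PySem.List.pyGet? l (i + 2) with _ | c <;> simp <;> split <;> simp
      rw [this, List.append_assoc]

lemma pvA_eq_scan (l : List Char) :
    (PySem.List.pyRange 0 ((l.length : Int) - 2) 1).flatMap (pvStepOut l) = pvReScan l := by
  induction l with
  | nil => simp [PySem.List.pyRange_one_eq_nil, pvReScan]
  | cons a t ih =>
      match t with
      | [] => simp [PySem.List.pyRange_one_eq_nil, pvReScan]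
      | [b] => simp [PySem.List.pyRange_one_eq_nil, pvReScan]
      | b :: c :: r =>
          have hlen : ((a :: b :: c :: r).length : Int) - 2 = (r.length : Int) + 1 := by
            simp only [List.length_cons]; push_cast; ring
          have hpos : (0 : Int) < (r.length : Int) + 1 := by positivity
          rw [hlen, PySem.List.pyRange_one_cons hpos, List.flatMap_cons]
          have h0 : pvStepOut (a :: b :: c :: r) 0 =
              (if a = c ∧ a ≠ b then [String.ofList [a, b, c]] else []) := by
            have h1 : (0:Int) ≤ (r.length:Int) + 1 + 1 := by positivity
            have h2 : (0:Int) ≤ (r.length:Int) + 1 := by positivity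
            have h3 : (2:Int) ≤ (r.length:Int) + 1 + 1 := by omega
            simp [pvStepOut, PySem.List.pyGet?, PySem.List.pyIdx?, h1, h2, h3]
          have hsh : (PySem.List.pyRange (0 + 1) ((r.length : Int) + 1) 1).flatMap
              (pvStepOut (a :: b :: c :: r)) = pvReScan (b :: c :: r) := by
            have hlen' : ((b :: c :: r).length : Int) - 2 = (r.length : Int) := by
              simp only [List.length_cons]; push_cast; ring
            rw [← ih, hlen']
            rw [show (0 : Int) + 1 = 1 from rfl, PySem.List.pyRange_one,
                PySem.List.pyRange_one, List.flatMap_map, List.flatMap_map]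
            have harg : ((r.length : Int) + 1 - 1).toNat = ((r.length : Int) - 0).toNat := by omega
            rw [harg]
            apply List.flatMap_congr  -- congruence over the shared index list
            intro k _
            have : (1 : Int) + (k : Int) = (k : Int) + 1 := by ring
            rw [this, pvStepOut_cons]
            simp
          rw [hsh, h0]
          have hre : pvReScan (a :: b :: c :: r) =
              if c = a ∧ b ≠ a then String.ofList [a, b, c] :: pvReScan (b :: c :: r)
              else pvReScan (b :: c :: r) := rfl
          rw [hre]
          by_cases h : a = c ∧ a ≠ b
          · obtain ⟨h1, h2⟩ := h
            subst h1
            rw [if_pos ⟨rfl, h2⟩, if_pos ⟨rfl, fun hba => h2 hba.symm⟩]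
            rfl
          · have h' : ¬ (c = a ∧ b ≠ a) := by
              rintro ⟨rfl, hb⟩; exact h ⟨rfl, fun hab => hb hab.symm⟩
            rw [if_neg h, if_neg h', List.nil_append]

-- ===== VERDICT (by name: the statement is the Claim_ definition above) =====
theorem findABA_spec : Claim_equal_findABA := by
  intro message _
  show findABA message = findABA_alt message
  unfold findABA findABA_alt
  have hlen : PySem.Str.len message = (message.toList.length : Int) := by
    simp [PySem.Str.len]
  have hget : ∀ i : Int, PySem.Str.pyGet? message i = PySem.List.pyGet? message.toList i := by
    intro i; simp [PySem.Str.pyGet?]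
  simp only [hlen, hget]
  rw [pvFold_eq_flatMap, List.nil_append, pvA_eq_scan]
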